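-- pv_equiv track=rewrite | github.com/michaelsmiller/py1e | gaussians.py | generate_orbitals
-- ===== SOURCE A (Python) =====
-- from typing import Tuple, List, Sequence
--
-- L = int
--
-- N = Tuple[L, L, L]
--
-- def generate_orbitals(max_l : L) -> List[N]:
--     orbitals = []
--     for x in range(max_l+1):
--         for y in range(max_l+1 - x): # y is constrained by x (I don't think this constraint is required)
--             for z in range(max_l+1 - x - y): # z is constrained by x and y
--                 n = (x,y,z)
--                 orbitals.append(n)
--     # sort first by total angular momentum, then by components, in alphabetical x,y,z order
--     orbitals.sort(key=lambda x: (sum(x), x))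
--     return orbitals
-- ===== SOURCE B (Python) =====
-- def generate_orbitals(max_l):
--     # emit triples directly in (total, x, y) lexicographic order: no sort needed
--     orbitals = []
--     for l in range(max_l + 1):
--         for x in range(l + 1):
--             for y in range(l - x + 1):
--                 orbitals.append((x, y, l - x - y))
--     return orbitals
-- ===== Notes on version B (the rewrite author's own statement) =====
-- stated objective: faster
-- what changed: B emits the triples directly in total-then-lexicographic order by iterating over the total l first (z = l-x-y), removing A's post-hoc sort entirely.
import Mathlib
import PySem

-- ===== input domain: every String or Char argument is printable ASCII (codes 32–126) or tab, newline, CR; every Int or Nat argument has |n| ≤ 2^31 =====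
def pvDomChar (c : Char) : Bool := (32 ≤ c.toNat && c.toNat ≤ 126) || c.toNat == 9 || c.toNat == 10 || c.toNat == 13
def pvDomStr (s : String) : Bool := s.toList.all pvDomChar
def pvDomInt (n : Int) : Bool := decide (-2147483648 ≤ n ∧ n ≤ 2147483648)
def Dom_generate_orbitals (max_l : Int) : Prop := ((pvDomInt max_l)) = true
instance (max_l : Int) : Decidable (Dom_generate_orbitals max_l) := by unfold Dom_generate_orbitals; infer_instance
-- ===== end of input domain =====

-- B generates the triples directly in (total, x, y, z)-lexicographic order, so A's sort disappears (objective: faster).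

-- ===== PORT A =====
-- Python's tuple comparison for the sort key `lambda x: (sum(x), x)`: lexicographic on
-- (sum, x, y, z). Written out explicitly because Lean's `<` on products is not Python's
-- lexicographic order; exact for integer tuples.
def pyKeyLt (a b : Int × Int × Int) : Bool :=
  decide (a.1 + a.2.1 + a.2.2 < b.1 + b.2.1 + b.2.2) ||
  (decide (a.1 + a.2.1 + a.2.2 = b.1 + b.2.1 + b.2.2) &&
    (decide (a.1 < b.1) ||
      (decide (a.1 = b.1) &&
        (decide (a.2.1 < b.2.1) ||
          (decide (a.2.1 = b.2.1) && decide (a.2.2 < b.2.2))))))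

-- the three nested `for` loops building `orbitals` before the sort
def pvRawA (max_l : Int) : List (Int × Int × Int) :=
  (PySem.List.pyRange 0 (max_l + 1) 1).foldl (fun acc x =>
    (PySem.List.pyRange 0 (max_l + 1 - x) 1).foldl (fun acc y =>
      (PySem.List.pyRange 0 (max_l + 1 - x - y) 1).foldl (fun acc z =>
        acc ++ [(x, y, z)]) acc) acc) []

def generate_orbitals (max_l : Int) : List (Int × Int × Int) :=
  -- orbitals.sort(key=lambda x: (sum(x), x)): Python's stable sort is PySem's stable
  -- insertion sort in exactly this foldl/insertBy shape (PySem.List.sorted_eq_foldl_insertBy),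
  -- with the tuple-key comparison pyKeyLt.
  (pvRawA max_l).foldl (fun acc n => PySem.List.insertBy pyKeyLt n acc) []

-- ===== PORT B =====
def generate_orbitals_alt (max_l : Int) : List (Int × Int × Int) :=
  (PySem.List.pyRange 0 (max_l + 1) 1).foldl (fun acc l =>
    (PySem.List.pyRange 0 (l + 1) 1).foldl (fun acc x =>
      (PySem.List.pyRange 0 (l - x + 1) 1).foldl (fun acc y =>
        acc ++ [(x, y, l - x - y)]) acc) acc) []

-- ===== PRECONDITION & SPEC =====
def Spec_generate_orbitals (max_l : Int) (out : List (Int × Int × Int)) : Prop := out = generate_orbitals_alt max_l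
instance (max_l : Int) (out : List (Int × Int × Int)) : Decidable (Spec_generate_orbitals max_l out) := by unfold Spec_generate_orbitals; infer_instance

-- ===== CLAIM (what is proved, stated in full; the proofs are below) =====
def Claim_equal_generate_orbitals : Prop := ∀ (max_l : Int), Dom_generate_orbitals max_l → Spec_generate_orbitals max_l (generate_orbitals max_l)

-- ===== LEMMAS AND PROOFS =====

-- an injective monotone Int encoding of the key (sum, x, y, z) on the bounded domain
def pvKey (t : Int × Int × Int) : Int :=
  (t.1 + t.2.1 + t.2.2) * 633825300114114700748351602688 +
    t.1 * 73786976294838206464 + t.2.1 * 8589934592 + t.2.2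

-- components of every triple either program produces lie in [0, 2^31]
def pvBnd (t : Int × Int × Int) : Prop :=
  0 ≤ t.1 ∧ t.1 ≤ 2147483648 ∧ 0 ≤ t.2.1 ∧ t.2.1 ≤ 2147483648 ∧ 0 ≤ t.2.2 ∧ t.2.2 ≤ 2147483648

lemma pyKeyLt_eq_key {a b : Int × Int × Int} (ha : pvBnd a) (hb : pvBnd b) :
    pyKeyLt a b = decide (pvKey a < pvKey b) := by
  obtain ⟨a1, a2, a3⟩ := a; obtain ⟨b1, b2, b3⟩ := b
  simp only [pvBnd] at ha hb
  rw [Bool.eq_iff_iff]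
  simp only [pyKeyLt, pvKey, Bool.or_eq_true, Bool.and_eq_true, decide_eq_true_eq]
  constructor <;> intro h <;> omega

lemma pvRawA_eq (max_l : Int) :
    pvRawA max_l = (PySem.List.pyRange 0 (max_l + 1) 1).flatMap (fun x =>
      (PySem.List.pyRange 0 (max_l + 1 - x) 1).flatMap (fun y =>
        (PySem.List.pyRange 0 (max_l + 1 - x - y) 1).map (fun z => (x, y, z)))) := by
  simp only [pvRawA, PySem.List.foldl_append_singleton_eq_map,
    PySem.List.foldl_append_eq_flatMap, List.nil_append]

lemma alt_eq (max_l : Int) :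
    generate_orbitals_alt max_l = (PySem.List.pyRange 0 (max_l + 1) 1).flatMap (fun l =>
      (PySem.List.pyRange 0 (l + 1) 1).flatMap (fun x =>
        (PySem.List.pyRange 0 (l - x + 1) 1).map (fun y => (x, y, l - x - y)))) := by
  simp only [generate_orbitals_alt, PySem.List.foldl_append_singleton_eq_map,
    PySem.List.foldl_append_eq_flatMap, List.nil_append]

lemma mem_pvRawA {max_l : Int} {t : Int × Int × Int} :
    t ∈ pvRawA max_l ↔ 0 ≤ t.1 ∧ 0 ≤ t.2.1 ∧ 0 ≤ t.2.2 ∧ t.1 + t.2.1 + t.2.2 ≤ max_l := by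
  obtain ⟨x, y, z⟩ := t
  rw [pvRawA_eq]
  simp only [List.mem_flatMap, List.mem_map, PySem.List.mem_pyRange_one, Prod.mk.injEq]
  constructor
  · rintro ⟨a, ⟨_, _⟩, b, ⟨_, _⟩, c, ⟨_, _⟩, rfl, rfl, rfl⟩; omega
  · rintro ⟨h1, h2, h3, h4⟩; exact ⟨x, by omega, y, by omega, z, by omega, rfl, rfl, rfl⟩

lemma mem_alt {max_l : Int} {t : Int × Int × Int} :
    t ∈ generate_orbitals_alt max_l ↔ 0 ≤ t.1 ∧ 0 ≤ t.2.1 ∧ 0 ≤ t.2.2 ∧ t.1 + t.2.1 + t.2.2 ≤ max_l := by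
  obtain ⟨x, y, z⟩ := t
  rw [alt_eq]
  simp only [List.mem_flatMap, List.mem_map, PySem.List.mem_pyRange_one, Prod.mk.injEq]
  constructor
  · rintro ⟨l, ⟨_, _⟩, a, ⟨_, _⟩, b, ⟨_, _⟩, rfl, rfl, rfl⟩; omega
  · rintro ⟨h1, h2, h3, h4⟩
    exact ⟨x + y + z, by omega, x, by omega, y, by omega, rfl, rfl, by omega⟩

lemma nodup_pvRawA (max_l : Int) : (pvRawA max_l).Nodup := by
  rw [pvRawA_eq]
  rw [List.nodup_flatMap]
  refine ⟨fun x _ => ?_, ?_⟩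
  · rw [List.nodup_flatMap]
    refine ⟨fun y _ => ?_, ?_⟩
    · exact (PySem.List.nodup_pyRange_one _ _).map
        (fun a b h => by simpa using h)
    · refine (PySem.List.nodup_pyRange_one 0 (max_l + 1 - x)).imp ?_
      intro a b hab t hta htb
      simp only [List.mem_map] at hta htb
      obtain ⟨z1, _, e1⟩ := hta; obtain ⟨z2, _, e2⟩ := htb
      apply hab; rw [← e2] at e1
      simpa using congrArg (fun p => p.2.1) e1
  · refine (PySem.List.nodup_pyRange_one 0 (max_l + 1)).imp ?_
    intro a b hab t hta htb
    simp only [List.mem_flatMap, List.mem_map] at hta htb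
    obtain ⟨y1, _, z1, _, e1⟩ := hta; obtain ⟨y2, _, z2, _, e2⟩ := htb
    apply hab; rw [← e2] at e1
    simpa using congrArg (fun p => p.1) e1

lemma nodup_alt (max_l : Int) : (generate_orbitals_alt max_l).Nodup := by
  rw [alt_eq]
  rw [List.nodup_flatMap]
  refine ⟨fun l _ => ?_, ?_⟩
  · rw [List.nodup_flatMap]
    refine ⟨fun x _ => ?_, ?_⟩
    · exact (PySem.List.nodup_pyRange_one _ _).map
        (fun a b h => by simpa using h)
    · refine (PySem.List.nodup_pyRange_one 0 (l + 1)).imp ?_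
      intro a b hab t hta htb
      simp only [List.mem_map] at hta htb
      obtain ⟨y1, _, e1⟩ := hta; obtain ⟨y2, _, e2⟩ := htb
      apply hab; rw [← e2] at e1
      simpa using congrArg (fun p => p.1) e1
  · refine (PySem.List.nodup_pyRange_one 0 (max_l + 1)).imp ?_
    intro a b hab t hta htb
    simp only [List.mem_flatMap, List.mem_map] at hta htb
    obtain ⟨x1, _, y1, _, e1⟩ := hta; obtain ⟨x2, _, y2, _, e2⟩ := htb
    apply hab
    have s1 : t.1 + t.2.1 + t.2.2 = a := by rw [← e1]; ring
    have s2 : t.1 + t.2.1 + t.2.2 = b := by rw [← e2]; ring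
    omega

lemma perm_alt_raw (max_l : Int) : (generate_orbitals_alt max_l).Perm (pvRawA max_l) := by
  rw [List.perm_ext_iff_of_nodup (nodup_alt max_l) (nodup_pvRawA max_l)]
  intro t; rw [mem_alt, mem_pvRawA]

-- B's list is strictly increasing under the encoded key
lemma pairwise_alt (max_l : Int) (hd : max_l ≤ 2147483648) :
    (generate_orbitals_alt max_l).Pairwise (fun a b => pvKey a < pvKey b) := by
  rw [alt_eq, List.pairwise_flatMap]
  constructor
  · intro l hl
    rw [List.pairwise_flatMap]
    constructor
    · intro x hx
      rw [List.pairwise_map]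
      refine (PySem.List.pairwise_lt_pyRange_one 0 (l - x + 1)).imp_of_mem ?_
      intro a b ha hb hab
      rw [PySem.List.mem_pyRange_one] at ha hb
      rw [PySem.List.mem_pyRange_one] at hl hx
      simp only [pvKey]; omega
    · refine (PySem.List.pairwise_lt_pyRange_one 0 (l + 1)).imp_of_mem ?_
      intro x1 x2 hx1 hx2 hxx t1 ht1 t2 ht2
      rw [PySem.List.mem_pyRange_one] at hx1 hx2 hl
      simp only [List.mem_map, PySem.List.mem_pyRange_one] at ht1 ht2
      obtain ⟨y1, hy1, rfl⟩ := ht1; obtain ⟨y2, hy2, rfl⟩ := ht2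
      simp only [pvKey]; omega
  · refine (PySem.List.pairwise_lt_pyRange_one 0 (max_l + 1)).imp_of_mem ?_
    intro l1 l2 hl1 hl2 hll t1 ht1 t2 ht2
    rw [PySem.List.mem_pyRange_one] at hl1 hl2
    simp only [List.mem_flatMap, List.mem_map, PySem.List.mem_pyRange_one] at ht1 ht2
    obtain ⟨x1, hx1, y1, hy1, rfl⟩ := ht1; obtain ⟨x2, hx2, y2, hy2, rfl⟩ := ht2
    simp only [pvKey]; omega

-- congruence for Python's insertion step when the two comparators agree on the listed elements
lemma insertBy_congr {α : Type} (lt lt' : α → α → Bool) (x : α) (acc : List α)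
    (h : ∀ b ∈ acc, lt x b = lt' x b) :
    PySem.List.insertBy lt x acc = PySem.List.insertBy lt' x acc := by
  induction acc with
  | nil => rfl
  | cons y ys ih =>
    simp only [PySem.List.insertBy]
    rw [h y (by simp)]
    split
    · rfl
    · rw [ih (fun b hb => h b (by simp [hb]))]

lemma sortfold_congr {α : Type} (lt lt' : α → α → Bool) (P : α → Prop)
    (hP : ∀ a b, P a → P b → lt a b = lt' a b) :
    ∀ (l acc : List α), (∀ a ∈ l, P a) → (∀ a ∈ acc, P a) →
      l.foldl (fun acc n => PySem.List.insertBy lt n acc) acc =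
        l.foldl (fun acc n => PySem.List.insertBy lt' n acc) acc := by
  intro l
  induction l with
  | nil => intro acc _ _; rfl
  | cons x xs ih =>
    intro acc hl hacc
    simp only [List.foldl_cons]
    rw [insertBy_congr lt lt' x acc
      (fun b hb => hP x b (hl x (by simp)) (hacc b hb))]
    apply ih
    · exact fun a ha => hl a (by simp [ha])
    · intro a ha
      rw [PySem.List.mem_insertBy] at ha
      rcases ha with rfl | ha
      · exact hl a (by simp)
      · exact hacc a ha

theorem generate_orbitals_spec : Claim_equal_generate_orbitals := by
  intro max_l hdom
  unfold Spec_generate_orbitals generate_orbitals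
  have hd : max_l ≤ 2147483648 := by
    simp only [Dom_generate_orbitals, pvDomInt, decide_eq_true_eq] at hdom; omega
  have hbnd : ∀ t ∈ pvRawA max_l, pvBnd t := by
    intro t ht
    rw [mem_pvRawA] at ht
    exact ⟨by omega, by omega, by omega, by omega, by omega, by omega⟩
  rw [sortfold_congr pyKeyLt (fun a b => decide (pvKey a < pvKey b)) pvBnd
    (fun a b ha hb => pyKeyLt_eq_key ha hb) (pvRawA max_l) [] hbnd (by simp)]
  have : (pvRawA max_l).foldl
      (fun acc n => PySem.List.insertBy (fun a b => decide (pvKey a < pvKey b)) n acc) [] =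
      PySem.List.sorted (pvRawA max_l) pvKey := by
    rw [PySem.List.sorted_eq_foldl_insertBy]
  rw [this]
  exact PySem.List.sorted_eq_of_perm_of_pairwise_lt _ _ pvKey
    (perm_alt_raw max_l) (pairwise_alt max_l hd)
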